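-- pv_equiv track=rewrite | github.com/zmwangx/Project-Euler | 215/solution.py | generate_rows
-- ===== SOURCE A (Python) =====
-- import itertools
--
-- def generate_rows(width):
--     rows = []
--     for n2 in range(width // 2 + 1):
--         if (width - n2 * 2) % 3 != 0:
--             continue
--         n3 = (width - n2 * 2) // 3
--         for combo in itertools.combinations(range(n2 + n3), n2):
--             pos = 0
--             row = set()
--             for i in range(n2 + n3):
--                 pos += 2 if i in combo else 3
--                 row.add(pos)
--             rows.append(row)
--     return rows
-- ===== SOURCE B (Python) =====
-- def _place(twos, threes, pos, row):
--     out = []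
--     stack = [(twos, threes, pos, row)]
--     while stack:
--         t2, t3, p, r = stack.pop()
--         if t2 == 0 and t3 == 0:
--             out.append(r)
--             continue
--         if t3 > 0:
--             stack.append((t2, t3 - 1, p + 3, r | {p + 3}))
--         if t2 > 0:
--             stack.append((t2 - 1, t3, p + 2, r | {p + 2}))
--     return out
--
--
-- def generate_rows(width):
--     rows = []
--     for n2 in range(width // 2 + 1):
--         if (width - 2 * n2) % 3:
--             continue
--         rows += _place(n2, (width - 2 * n2) // 3, 0, set())
--     return rows
-- ===== Notes on version B (the rewrite author's own statement) =====
-- stated objective: alternative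
-- what changed: Replaces the itertools.combinations enumeration plus a per-combination row-rebuilding scan by an explicit-stack DFS that, at each step, places a two-unit block before a three-unit block and emits each finished row once; trying the two-unit block first reproduces the lexicographic row order.
import Mathlib
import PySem

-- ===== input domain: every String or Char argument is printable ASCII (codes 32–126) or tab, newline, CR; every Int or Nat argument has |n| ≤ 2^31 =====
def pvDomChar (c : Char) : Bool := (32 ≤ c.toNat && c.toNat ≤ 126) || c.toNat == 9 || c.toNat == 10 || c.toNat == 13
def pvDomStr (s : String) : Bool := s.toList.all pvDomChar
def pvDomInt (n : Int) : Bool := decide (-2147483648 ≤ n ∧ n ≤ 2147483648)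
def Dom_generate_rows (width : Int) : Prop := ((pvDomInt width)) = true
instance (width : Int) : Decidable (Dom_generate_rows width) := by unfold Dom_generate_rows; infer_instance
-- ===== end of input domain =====

-- B replaces the itertools.combinations enumeration + per-combo rebuild loop by an explicit-stack
-- DFS placing a two-unit block before a three-unit block (same rows, same order); objective: alternative.

-- ===== PORT A =====
-- row sets are built in strictly increasing position order, so PySem.Set (insertion order) is exact
def generate_rows (width : Int) : List (List Int) :=
  (PySem.List.pyRange 0 (PySem.Int.floordiv width 2 + 1) 1).foldl
    (fun rows n2 =>
      if PySem.Int.mod (width - n2 * 2) 3 ≠ 0 then rows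
      else
        let n3 := PySem.Int.floordiv (width - n2 * 2) 3
        -- n2 comes from range(width//2+1) so n2 ≥ 0 and n2.toNat is exactly Python's r
        (PySem.List.combinations (PySem.List.pyRange 0 (n2 + n3) 1) n2.toNat).foldl
          (fun rows combo =>
            rows ++
              [((PySem.List.pyRange 0 (n2 + n3) 1).foldl
                  (fun (st : Int × PySem.Set Int) i =>
                    let pos := st.1 + (if combo.contains i then 2 else 3)
                    (pos, PySem.Set.add st.2 pos))
                  ((0 : Int), (PySem.Set.empty : PySem.Set Int))).2])
          rows)
    []

-- ===== PORT B =====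
-- the 'while stack:' loop of _place; top of stack = head of the list. The fuel argument only
-- makes the loop total; generate_rows_alt supplies enough fuel for the full DFS
-- (placeAlt_eq_flatMap below proves the loop then never runs out).
def placeAlt : Nat → List (Int × Int × Int × PySem.Set Int) → List (List Int) → List (List Int)
  | _, [], out => out
  | 0, _ :: _, out => out
  | fuel + 1, (t2, t3, p, r) :: rest, out =>
    if t2 = 0 ∧ t3 = 0 then placeAlt fuel rest (out ++ [r])
    else
      placeAlt fuel
        ((if 0 < t2 then [(t2 - 1, t3, p + 2, PySem.Set.add r (p + 2))] else []) ++
         (if 0 < t3 then [(t2, t3 - 1, p + 3, PySem.Set.add r (p + 3))] else []) ++ rest)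
        out

def generate_rows_alt (width : Int) : List (List Int) :=
  (PySem.List.pyRange 0 (PySem.Int.floordiv width 2 + 1) 1).foldl
    (fun rows n2 =>
      if PySem.Int.mod (width - 2 * n2) 3 ≠ 0 then rows
      else
        rows ++
          placeAlt (3 ^ (n2.toNat + (PySem.Int.floordiv (width - 2 * n2) 3).toNat))
            [(n2, PySem.Int.floordiv (width - 2 * n2) 3, 0, PySem.Set.empty)] [])
    []

-- ===== PRECONDITION & SPEC =====
def Spec_generate_rows (width : Int) (out : List (List Int)) : Prop := out = generate_rows_alt width
instance (width : Int) (out : List (List Int)) : Decidable (Spec_generate_rows width out) := by unfold Spec_generate_rows; infer_instance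

-- ===== CLAIM (what is proved, stated in full; the proofs are below) =====
def Claim_equal_generate_rows : Prop := ∀ (width : Int), Dom_generate_rows width → Spec_generate_rows width (generate_rows width)

-- ===== LEMMAS AND PROOFS =====

-- the body of A's inner row-building loop, as a named function
def rowStep (combo : List Int) (st : Int × PySem.Set Int) (i : Int) : Int × PySem.Set Int :=
  let pos := st.1 + (if combo.contains i then 2 else 3)
  (pos, PySem.Set.add st.2 pos)

lemma rowStep_congr_notmem (x : Int) (c xs : List Int) (hx : x ∉ xs) (st : Int × PySem.Set Int) :
    xs.foldl (rowStep (x :: c)) st = xs.foldl (rowStep c) st := by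
  apply PySem.List.foldl_congr_mem
  intro acc i hi
  have hne : i ≠ x := by rintro rfl; exact hx hi
  simp [rowStep, hne]


-- proof-side recursive formulation of the DFS (placeAlt processes its stack exactly like this)
def placeRec (twos threes pos : Int) (row : PySem.Set Int) : List (List Int) :=
  if twos = 0 ∧ threes = 0 then [row]
  else
    (if _h2 : 0 < twos then
        placeRec (twos - 1) threes (pos + 2) (PySem.Set.add row (pos + 2))
     else []) ++
    (if _h3 : 0 < threes then
        placeRec twos (threes - 1) (pos + 3) (PySem.Set.add row (pos + 3))
     else [])
termination_by twos.toNat + threes.toNat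
decreasing_by all_goals omega

theorem pv_pow3_split (n : Nat) (hn : 0 < n) : 3 ^ (n - 1) + 3 ^ (n - 1) < 3 ^ n := by
  obtain ⟨m, rfl⟩ : ∃ m, n = m + 1 := ⟨n - 1, by omega⟩
  have h0 : 0 < 3 ^ m := pow_pos (by norm_num) m
  simp only [Nat.add_sub_cancel, pow_succ]
  omega

theorem pv_measure_pop (t2 t3 p : Int) (r : PySem.Set Int)
    (rest : List (Int × Int × Int × PySem.Set Int)) :
    ((rest.map (fun e => 3 ^ (e.1.toNat + e.2.1.toNat))).sum)
      < ((((t2, t3, p, r) :: rest).map (fun e => 3 ^ (e.1.toNat + e.2.1.toNat))).sum) := by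
  simp only [List.map_cons, List.sum_cons]
  have h0 : 0 < 3 ^ (t2.toNat + t3.toNat) := pow_pos (by norm_num) _
  omega

theorem pv_measure_push (t2 t3 p : Int) (r : PySem.Set Int)
    (rest : List (Int × Int × Int × PySem.Set Int)) (_h : ¬(t2 = 0 ∧ t3 = 0)) :
    ((((if 0 < t2 then [(t2 - 1, t3, p + 2, PySem.Set.add r (p + 2))] else []) ++
       (if 0 < t3 then [(t2, t3 - 1, p + 3, PySem.Set.add r (p + 3))] else []) ++
       rest).map (fun e => 3 ^ (e.1.toNat + e.2.1.toNat))).sum)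
      < ((((t2, t3, p, r) :: rest).map (fun e => 3 ^ (e.1.toNat + e.2.1.toNat))).sum) := by
  simp only [List.map_append, List.sum_append, List.map_cons, List.sum_cons]
  split_ifs with h2 h3 h3
  · have ea : (t2 - 1).toNat + t3.toNat = t2.toNat + t3.toNat - 1 := by omega
    have eb : t2.toNat + (t3 - 1).toNat = t2.toNat + t3.toNat - 1 := by omega
    have := pv_pow3_split (t2.toNat + t3.toNat) (by omega)
    simp only [List.map_cons, List.sum_cons, List.map_nil, List.sum_nil, ea, eb]
    omega
  · have ea : (t2 - 1).toNat + t3.toNat = t2.toNat + t3.toNat - 1 := by omega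
    have := pv_pow3_split (t2.toNat + t3.toNat) (by omega)
    have hpos : 0 < 3 ^ (t2.toNat + t3.toNat - 1) := pow_pos (by norm_num) _
    simp only [List.map_cons, List.sum_cons, List.map_nil, List.sum_nil, ea]
    omega
  · have eb : t2.toNat + (t3 - 1).toNat = t2.toNat + t3.toNat - 1 := by omega
    have := pv_pow3_split (t2.toNat + t3.toNat) (by omega)
    have hpos : 0 < 3 ^ (t2.toNat + t3.toNat - 1) := pow_pos (by norm_num) _
    simp only [List.map_cons, List.sum_cons, List.map_nil, List.sum_nil, eb]
    omega
  · have h0 : 0 < 3 ^ (t2.toNat + t3.toNat) := pow_pos (by norm_num) _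
    simp only [List.map_nil, List.sum_nil]
    omega


lemma placeAlt_eq_flatMap :
    ∀ (fuel : Nat) (stack : List (Int × Int × Int × PySem.Set Int)) (out : List (List Int)),
    (stack.map (fun e => 3 ^ (e.1.toNat + e.2.1.toNat))).sum ≤ fuel →
    placeAlt fuel stack out
      = out ++ stack.flatMap (fun e => placeRec e.1 e.2.1 e.2.2.1 e.2.2.2) := by
  intro fuel
  induction fuel with
  | zero =>
    intro stack out h
    match stack with
    | [] => simp [placeAlt]
    | (t2, t3, p, r) :: rest =>
      exfalso
      have hp : 0 < 3 ^ (t2.toNat + t3.toNat) := pow_pos (by norm_num) _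
      simp only [List.map_cons, List.sum_cons] at h
      omega
  | succ fuel ih =>
    intro stack out h
    match stack with
    | [] => simp [placeAlt]
    | (t2, t3, p, r) :: rest =>
      rw [placeAlt]
      by_cases h0 : t2 = 0 ∧ t3 = 0
      · rw [if_pos h0,
            ih rest (out ++ [r])
              (by have := pv_measure_pop t2 t3 p r rest; omega)]
        simp only [List.flatMap_cons]
        rw [show placeRec t2 t3 p r = [r] from by rw [placeRec, if_pos (by exact h0)]]
        simp
      · rw [if_neg h0,
            ih _ out (by have := pv_measure_push t2 t3 p r rest h0; omega)]
        simp only [List.flatMap_cons]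
        rw [show placeRec t2 t3 p r
            = (if _h2 : 0 < t2 then
                 placeRec (t2 - 1) t3 (p + 2) (PySem.Set.add r (p + 2)) else []) ++
              (if _h3 : 0 < t3 then
                 placeRec t2 (t3 - 1) (p + 3) (PySem.Set.add r (p + 3)) else [])
            from by rw [placeRec, if_neg h0]]
        simp only [List.flatMap_append, dite_eq_ite]
        split_ifs <;> simp

lemma place_eq_combos (xs : List Int) : ∀ (k : Nat), k ≤ xs.length → xs.Nodup →
    ∀ (pos : Int) (row : PySem.Set Int),
    placeRec (k : Int) ((xs.length - k : Nat) : Int) pos row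
      = (PySem.List.combinations xs k).map (fun c => (xs.foldl (rowStep c) (pos, row)).2) := by
  induction xs with
  | nil =>
    intro k hk _ pos row
    simp only [List.length_nil] at hk
    have hk0 : k = 0 := by omega
    subst hk0
    simp [placeRec, PySem.List.combinations_zero]
  | cons x xs ih =>
    intro k hk hnd pos row
    have hx : x ∉ xs := (List.nodup_cons.mp hnd).1
    have hnd' : xs.Nodup := (List.nodup_cons.mp hnd).2
    match k with
    | 0 =>
      rw [placeRec]
      have hlen : ((x :: xs).length - 0 : Nat) = xs.length + 1 := by simp
      rw [hlen]
      have ih0 := ih 0 (by omega) hnd' (pos + 3) (PySem.Set.add row (pos + 3))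
      push_cast at ih0 ⊢
      rw [if_neg (by rintro ⟨-, h⟩; omega),
          dif_pos (show (0 : Int) < (xs.length : Int) + 1 by omega)]
      have e1 : (xs.length : Int) + 1 - 1 = ((xs.length - 0 : Nat) : Int) := by omega
      rw [List.nil_append, e1, ih0]
      rw [PySem.List.combinations_zero, PySem.List.combinations_zero]
      simp only [List.map_cons, List.map_nil, List.foldl_cons]
      have hstep : rowStep [] (pos, row) x = (pos + 3, PySem.Set.add row (pos + 3)) := by
        simp [rowStep]
      rw [hstep]
    | k' + 1 =>
      have hk' : k' ≤ xs.length := by simpa [List.length_cons] using hk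
      rw [placeRec]
      have e2 : (((x :: xs).length - (k' + 1) : Nat)) = (xs.length - k' : Nat) := by
        simp only [List.length_cons]; omega
      rw [e2]
      have ih1 := ih k' hk' hnd' (pos + 2) (PySem.Set.add row (pos + 2))
      push_cast at ih1 ⊢
      rw [if_neg (by rintro ⟨h, -⟩; omega),
          dif_pos (show (0 : Int) < (k' : Int) + 1 by omega)]
      have e1 : (k' : Int) + 1 - 1 = (k' : Int) := by ring
      rw [e1, ih1]
      rw [PySem.List.combinations_cons_succ, List.map_append, List.map_map]
      congr 1
      · apply List.map_congr_left
        intro c hc'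
        simp only [Function.comp_apply, List.foldl_cons]
        have hstep : rowStep (x :: c) (pos, row) x = (pos + 2, PySem.Set.add row (pos + 2)) := by
          simp [rowStep]
        rw [hstep, rowStep_congr_notmem x c xs hx]
      · by_cases hlt : k' < xs.length
        · rw [dif_pos (show (0 : Int) < ((xs.length - k' : Nat) : Int) by omega)]
          have ih2 := ih (k' + 1) (by omega) hnd' (pos + 3) (PySem.Set.add row (pos + 3))
          push_cast at ih2
          have e3 : ((xs.length - k' : Nat) : Int) - 1 = ((xs.length - (k' + 1) : Nat) : Int) := by
            omega
          rw [e3, ih2]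
          apply List.map_congr_left
          intro c hc'
          simp only [List.foldl_cons]
          have hxc : x ∉ c :=
            fun hm => hx ((PySem.List.sublist_of_mem_combinations hc').subset hm)
          have hstep : rowStep c (pos, row) x = (pos + 3, PySem.Set.add row (pos + 3)) := by
            simp [rowStep, hxc]
          rw [hstep]
        · rw [dif_neg (show ¬ (0 : Int) < ((xs.length - k' : Nat) : Int) by omega)]
          rw [PySem.List.combinations_eq_nil_of_length_lt xs
                (show xs.length < k' + 1 by omega)]
          simp

lemma pyRange_len (n : Nat) : (PySem.List.pyRange 0 (n : Int) 1).length = n := by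
  simp [PySem.List.pyRange_zero_natCast]

lemma pyRange_nodup (n : Nat) : (PySem.List.pyRange 0 (n : Int) 1).Nodup := by
  rw [PySem.List.pyRange_zero_natCast]
  exact (List.nodup_range).map (fun a b h => by exact_mod_cast h)

-- ===== VERDICT (by name: the statement is the Claim_ definition above) =====
theorem generate_rows_spec : Claim_equal_generate_rows := by
  intro width _
  unfold Spec_generate_rows generate_rows generate_rows_alt
  apply PySem.List.foldl_congr_mem
  intro rows n2 hn2
  obtain ⟨h0, h1⟩ := PySem.List.mem_pyRange_one.mp hn2
  rw [PySem.Int.floordiv_eq_ediv_of_pos (by norm_num : (0 : Int) < 2)] at h1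
  have hmul : width - n2 * 2 = width - 2 * n2 := by ring
  rw [hmul]
  have hmod : PySem.Int.mod (width - 2 * n2) 3 = (width - 2 * n2) % 3 :=
    PySem.Int.mod_eq_emod_of_pos (by norm_num)
  by_cases hdiv : PySem.Int.mod (width - 2 * n2) 3 ≠ 0
  · rw [if_pos hdiv, if_pos hdiv]
  · rw [if_neg hdiv, if_neg hdiv]
    have hdiv0 : (width - 2 * n2) % 3 = 0 := by rw [← hmod]; exact not_not.mp hdiv
    have hfd : PySem.Int.floordiv (width - 2 * n2) 3 = (width - 2 * n2) / 3 :=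
      PySem.Int.floordiv_eq_ediv_of_pos (by norm_num)
    set n3 : Int := PySem.Int.floordiv (width - 2 * n2) 3 with hn3
    have hwnn : 0 ≤ width - 2 * n2 := by omega
    have hn3nn : 0 ≤ n3 := by rw [hfd]; omega
    have hNnn : 0 ≤ n2 + n3 := by omega
    have eN : ((n2 + n3).toNat : Int) = n2 + n3 := Int.toNat_of_nonneg hNnn
    have ek : (n2.toNat : Int) = n2 := Int.toNat_of_nonneg h0
    simp only [PySem.List.foldl_append_singleton_eq_map]
    rw [placeAlt_eq_flatMap _ _ _ (by simp)]
    simp only [List.flatMap_cons, List.flatMap_nil, List.append_nil, List.nil_append]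
    congr 1
    have hcast :
        placeRec n2 n3 0 PySem.Set.empty
          = placeRec ((n2.toNat : Nat) : Int)
              ((((PySem.List.pyRange 0 (n2 + n3) 1).length - n2.toNat : Nat)) : Int)
              0 PySem.Set.empty := by
      rw [← eN, pyRange_len]
      congr 1 <;> omega
    rw [hcast,
        place_eq_combos (PySem.List.pyRange 0 (n2 + n3) 1) n2.toNat
          (by rw [← eN, pyRange_len]; omega)
          (by rw [← eN]; exact pyRange_nodup _)]
    rfl
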